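-- pv_equiv track=rewrite | github.com/gardize007/Fully-Intelligent-Machine | health_service.py | guess_common_causes
-- ===== SOURCE A (Python) =====
-- from builtins import any, str
-- from typing import Dict, List
--
-- def guess_common_causes(text: str) -> List[Dict[str, str]]:
--     t = text.lower()
--     causes = []
--     if any(k in t for k in ["sore throat", "leg", "fever", "cough"]):
--         causes.append({"name": "Viral upper respiratory infection (cold/flu)", "likelihood": "high"})
--         causes.append({"name": "Strep throat", "likelihood": "medium"})
--         causes.append({"name": "Allergy-related irritation", "likelihood": "low"})
--     if "headache" in t or "migraine" in t:
--         causes.append({"name": "Tension headache", "likelihood": "high"})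
--         causes.append({"name": "Migraine", "likelihood": "medium"})
--         causes.append({"name": "Dehydration", "likelihood": "low"})
--     if "chest pain" in t:
--         causes.append({"name": "Musculoskeletal strain", "likelihood": "medium"})
--         causes.append({"name": "Cardiac cause", "likelihood": "unknown"})
--     return causes or [{"name": "General, non-specific symptoms", "likelihood": "unknown"}]
-- ===== SOURCE B (Python) =====
-- # Single-pass multi-pattern scan: walk the text once, at each position test which
-- # keywords start there and set a per-rule hit flag; then emit causes per hit rule.
-- _KEYWORD_RULE = [
--     ("sore throat", 0), ("leg", 0), ("fever", 0), ("cough", 0),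
--     ("headache", 1), ("migraine", 1),
--     ("chest pain", 2),
-- ]
-- _CAUSES = [
--     [{"name": "Viral upper respiratory infection (cold/flu)", "likelihood": "high"},
--      {"name": "Strep throat", "likelihood": "medium"},
--      {"name": "Allergy-related irritation", "likelihood": "low"}],
--     [{"name": "Tension headache", "likelihood": "high"},
--      {"name": "Migraine", "likelihood": "medium"},
--      {"name": "Dehydration", "likelihood": "low"}],
--     [{"name": "Musculoskeletal strain", "likelihood": "medium"},
--      {"name": "Cardiac cause", "likelihood": "unknown"}],
-- ]
--
-- def guess_common_causes(text):
--     t = text.lower()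
--     hit = [False, False, False]
--     for i in range(len(t)):
--         for kw, r in _KEYWORD_RULE:
--             if t.startswith(kw, i):
--                 hit[r] = True
--     causes = [c for r in range(3) if hit[r] for c in _CAUSES[r]]
--     return causes or [{"name": "General, non-specific symptoms", "likelihood": "unknown"}]
-- ===== Notes on version B (the rewrite author's own statement) =====
-- stated objective: alternative
-- what changed: Replaces A's three per-branch whole-text substring membership tests with a single left-to-right scan over text positions that matches a keyword-to-rule table (a naive multi-pattern matcher) into per-rule hit flags, then emits the causes of each hit rule.
import Mathlib
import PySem

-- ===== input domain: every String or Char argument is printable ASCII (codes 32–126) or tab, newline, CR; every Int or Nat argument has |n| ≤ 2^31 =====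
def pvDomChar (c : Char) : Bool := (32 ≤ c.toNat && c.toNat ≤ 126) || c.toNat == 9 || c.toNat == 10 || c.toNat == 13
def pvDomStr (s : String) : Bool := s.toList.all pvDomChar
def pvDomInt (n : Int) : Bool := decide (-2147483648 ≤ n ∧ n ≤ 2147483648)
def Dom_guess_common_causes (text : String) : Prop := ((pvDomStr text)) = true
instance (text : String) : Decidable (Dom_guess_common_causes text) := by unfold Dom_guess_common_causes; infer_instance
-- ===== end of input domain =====

-- B replaces A's per-branch substring tests with a single scan over text positions
-- matching a keyword->rule table into per-rule hit flags (alternative decomposition).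

-- ===== PORT A =====
def guess_common_causes (text : String) : List (List (String × String)) :=
  let t := PySem.Str.lower text
  let causes : List (List (String × String)) := []
  let causes :=
    if (["sore throat", "leg", "fever", "cough"].any (fun k => PySem.Str.isIn k t)) then
      causes ++ [[("name", "Viral upper respiratory infection (cold/flu)"), ("likelihood", "high")],
                 [("name", "Strep throat"), ("likelihood", "medium")],
                 [("name", "Allergy-related irritation"), ("likelihood", "low")]]
    else causes
  let causes :=
    if PySem.Str.isIn "headache" t || PySem.Str.isIn "migraine" t then
      causes ++ [[("name", "Tension headache"), ("likelihood", "high")],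
                 [("name", "Migraine"), ("likelihood", "medium")],
                 [("name", "Dehydration"), ("likelihood", "low")]]
    else causes
  let causes :=
    if PySem.Str.isIn "chest pain" t then
      causes ++ [[("name", "Musculoskeletal strain"), ("likelihood", "medium")],
                 [("name", "Cardiac cause"), ("likelihood", "unknown")]]
    else causes
  if causes = [] then [[("name", "General, non-specific symptoms"), ("likelihood", "unknown")]]
  else causes

-- ===== PORT B =====
def pvKwRule : List (List Char × Nat) :=
  [("sore throat".toList, 0), ("leg".toList, 0), ("fever".toList, 0), ("cough".toList, 0),
   ("headache".toList, 1), ("migraine".toList, 1),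
   ("chest pain".toList, 2)]

def pvCauses : List (List (List (String × String))) :=
  [[[("name", "Viral upper respiratory infection (cold/flu)"), ("likelihood", "high")],
    [("name", "Strep throat"), ("likelihood", "medium")],
    [("name", "Allergy-related irritation"), ("likelihood", "low")]],
   [[("name", "Tension headache"), ("likelihood", "high")],
    [("name", "Migraine"), ("likelihood", "medium")],
    [("name", "Dehydration"), ("likelihood", "low")]],
   [[("name", "Musculoskeletal strain"), ("likelihood", "medium")],
    [("name", "Cardiac cause"), ("likelihood", "unknown")]]]

-- t.startswith(kw, i) with 0 ≤ i (from range(len(t))) is exactly a prefix test on t.toList.drop i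
def guess_common_causes_alt (text : String) : List (List (String × String)) :=
  let t := (PySem.Str.lower text).toList
  let hit : List Bool :=
    (List.range t.length).foldl
      (fun hit i =>
        pvKwRule.foldl
          (fun h kr => if PySem.Chars.startswith (t.drop i) kr.1 then h.set kr.2 true else h)
          hit)
      [false, false, false]
  let causes :=
    (List.range 3).flatMap (fun r => if hit.getD r false then pvCauses.getD r [] else [])
  if causes = [] then [[("name", "General, non-specific symptoms"), ("likelihood", "unknown")]]
  else causes

-- ===== PRECONDITION & SPEC =====
def Spec_guess_common_causes (text : String) (out : List (List (String × String))) : Prop := out = guess_common_causes_alt text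
instance (text : String) (out : List (List (String × String))) : Decidable (Spec_guess_common_causes text out) := by unfold Spec_guess_common_causes; infer_instance

-- ===== CLAIM (what is proved, stated in full; the proofs are below) =====
def Claim_equal_guess_common_causes : Prop := ∀ (text : String), Dom_guess_common_causes text → Spec_guess_common_causes text (guess_common_causes text)

-- ===== LEMMAS AND PROOFS =====

-- distribute List.any over a disjunction of predicates (no library lemma closes this)
theorem pv_any_or {α : Type} (xs : List α) (p q : α → Bool) :
    (xs.any fun i => p i || q i) = (xs.any p || xs.any q) := by
  induction xs with
  | nil => rfl
  | cons a xs ih =>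
    simp [ih, Bool.or_assoc, Bool.or_left_comm]

-- one position step: the inner fold ORs the per-rule "some keyword starts here" tests into the flags
theorem pv_inner_step (t : List Char) (i : Nat) (a b c : Bool) :
    pvKwRule.foldl
      (fun h kr => if PySem.Chars.startswith (t.drop i) kr.1 then h.set kr.2 true else h)
      [a, b, c]
    = [a || (PySem.Chars.startswith (t.drop i) "sore throat".toList
          || PySem.Chars.startswith (t.drop i) "leg".toList
          || PySem.Chars.startswith (t.drop i) "fever".toList
          || PySem.Chars.startswith (t.drop i) "cough".toList),
       b || (PySem.Chars.startswith (t.drop i) "headache".toList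
          || PySem.Chars.startswith (t.drop i) "migraine".toList),
       c || PySem.Chars.startswith (t.drop i) "chest pain".toList] := by
  simp only [pvKwRule, List.foldl]
  generalize PySem.Chars.startswith (t.drop i) "sore throat".toList = s1
  generalize PySem.Chars.startswith (t.drop i) "leg".toList = s2
  generalize PySem.Chars.startswith (t.drop i) "fever".toList = s3
  generalize PySem.Chars.startswith (t.drop i) "cough".toList = s4
  generalize PySem.Chars.startswith (t.drop i) "headache".toList = s5
  generalize PySem.Chars.startswith (t.drop i) "migraine".toList = s6
  generalize PySem.Chars.startswith (t.drop i) "chest pain".toList = s7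
  revert a b c s1 s2 s3 s4 s5 s6 s7
  decide

-- the whole scan: each flag is "some keyword of the rule starts at some position < n"
theorem pv_scan_eq (t : List Char) (n : Nat) :
    (List.range n).foldl
      (fun hit i =>
        pvKwRule.foldl
          (fun h kr => if PySem.Chars.startswith (t.drop i) kr.1 then h.set kr.2 true else h)
          hit)
      [false, false, false]
    = [(List.range n).any (fun i => PySem.Chars.startswith (t.drop i) "sore throat".toList
          || PySem.Chars.startswith (t.drop i) "leg".toList
          || PySem.Chars.startswith (t.drop i) "fever".toList
          || PySem.Chars.startswith (t.drop i) "cough".toList),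
       (List.range n).any (fun i => PySem.Chars.startswith (t.drop i) "headache".toList
          || PySem.Chars.startswith (t.drop i) "migraine".toList),
       (List.range n).any (fun i => PySem.Chars.startswith (t.drop i) "chest pain".toList)] := by
  induction n with
  | zero => rfl
  | succ n ih =>
    rw [List.range_succ, List.foldl_append, ih, List.foldl_cons, List.foldl_nil, pv_inner_step]
    simp only [List.any_append, List.any_cons, List.any_nil, Bool.or_false]

-- "some position < length where kw starts" is exactly "kw in t" for a nonempty keyword
theorem pv_any_startswith (t kw : List Char) (hk : kw ≠ []) :
    (List.range t.length).any (fun i => PySem.Chars.startswith (t.drop i) kw)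
    = PySem.Chars.isIn kw t := by
  by_cases h : PySem.Chars.isIn kw t = true
  · rw [h, List.any_eq_true]
    obtain ⟨j, hj⟩ := (PySem.Chars.exists_prefix_drop_iff_isIn kw t).mpr h
    refine ⟨j, List.mem_range.mpr ?_, (PySem.Chars.startswith_iff _ _).mpr hj⟩
    by_contra hge
    rw [Nat.not_lt] at hge
    rw [List.drop_eq_nil_of_le hge] at hj
    exact hk (List.prefix_nil.mp hj)
  · rw [Bool.eq_false_iff.mpr h, List.any_eq_false]
    intro i _
    rw [Bool.not_eq_true, Bool.eq_false_iff]
    intro hs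
    exact h ((PySem.Chars.exists_prefix_drop_iff_isIn kw t).mp
      ⟨i, (PySem.Chars.startswith_iff _ _).mp hs⟩)

-- ===== VERDICT (by name: the statement is the Claim_ definition above) =====
theorem guess_common_causes_spec : Claim_equal_guess_common_causes := by
  intro text _
  unfold Spec_guess_common_causes guess_common_causes guess_common_causes_alt
  simp only [pv_scan_eq, pv_any_or]
  rw [pv_any_startswith _ _ (by decide), pv_any_startswith _ _ (by decide),
      pv_any_startswith _ _ (by decide), pv_any_startswith _ _ (by decide),
      pv_any_startswith _ _ (by decide), pv_any_startswith _ _ (by decide),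
      pv_any_startswith _ _ (by decide)]
  simp only [PySem.Str.isIn_eq, List.any_cons, List.any_nil, Bool.or_false]
  generalize PySem.Chars.isIn "sore throat".toList (PySem.Str.lower text).toList = c1
  generalize PySem.Chars.isIn "leg".toList (PySem.Str.lower text).toList = c2
  generalize PySem.Chars.isIn "fever".toList (PySem.Str.lower text).toList = c3
  generalize PySem.Chars.isIn "cough".toList (PySem.Str.lower text).toList = c4
  generalize PySem.Chars.isIn "headache".toList (PySem.Str.lower text).toList = c5
  generalize PySem.Chars.isIn "migraine".toList (PySem.Str.lower text).toList = c6
  generalize PySem.Chars.isIn "chest pain".toList (PySem.Str.lower text).toList = c7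
  cases c1 <;> cases c2 <;> cases c3 <;> cases c4 <;> cases c5 <;> cases c6 <;> cases c7 <;> rfl
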